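-- pv_equiv track=rewrite | github.com/metonline/mgbric | batch_update_hands.py | rotate_hands_by_dealer
-- ===== SOURCE A (Python) =====
-- def rotate_hands_by_dealer(hand_in_dealer_order, dealer):
--     """
--     Rotate hands from dealer-relative order to N-E-S-W order.
--
--     hand_in_dealer_order: list of 3 hands [dealer_hand, next_hand, next_next_hand]
--     dealer: 'N', 'E', 'S', or 'W'
--
--     Returns: dict with 'N', 'E', 'S', 'W' keys
--     """
--     hands_from_dealer = {
--         'N': {'N': 0, 'E': 1, 'S': 2},  # N deals: hand[0]=N, hand[1]=E, hand[2]=S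
--         'E': {'E': 0, 'S': 1, 'W': 2},  # E deals: hand[0]=E, hand[1]=S, hand[2]=W
--         'S': {'S': 0, 'W': 1, 'N': 2},  # S deals: hand[0]=S, hand[1]=W, hand[2]=N
--         'W': {'W': 0, 'N': 1, 'E': 2},  # W deals: hand[0]=W, hand[1]=N, hand[2]=E
--     }
--
--     mapping = hands_from_dealer[dealer]
--     result = {}
--
--     for direction, index in mapping.items():
--         result[direction] = hand_in_dealer_order[index]
--
--     return result
-- ===== SOURCE B (Python) =====
-- def rotate_hands_by_dealer(hand_in_dealer_order, dealer):
--     """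
--     Rotate hands from dealer-relative order to N-E-S-W order.
--
--     Rotate the compass string so it starts at the dealer, then pair the
--     rotated seats with the first three hands in one zip -- no per-seat
--     index table and no explicit insertion loop.
--     """
--     compass = 'NESW'
--     d = compass.index(dealer)
--     seats = compass[d:] + compass[:d]
--     return dict(zip(seats, hand_in_dealer_order[:3]))
-- ===== Notes on version B (the rewrite author's own statement) =====
-- stated objective: idiomatic
-- what changed: Replaces the hardcoded 4x3 dealer->direction index table and its insertion loop with rotating the compass string to start at the dealer (compass[d:]+compass[:d]) and zipping the rotated seats with the first three hands into a dict in one expression.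
import Mathlib
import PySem

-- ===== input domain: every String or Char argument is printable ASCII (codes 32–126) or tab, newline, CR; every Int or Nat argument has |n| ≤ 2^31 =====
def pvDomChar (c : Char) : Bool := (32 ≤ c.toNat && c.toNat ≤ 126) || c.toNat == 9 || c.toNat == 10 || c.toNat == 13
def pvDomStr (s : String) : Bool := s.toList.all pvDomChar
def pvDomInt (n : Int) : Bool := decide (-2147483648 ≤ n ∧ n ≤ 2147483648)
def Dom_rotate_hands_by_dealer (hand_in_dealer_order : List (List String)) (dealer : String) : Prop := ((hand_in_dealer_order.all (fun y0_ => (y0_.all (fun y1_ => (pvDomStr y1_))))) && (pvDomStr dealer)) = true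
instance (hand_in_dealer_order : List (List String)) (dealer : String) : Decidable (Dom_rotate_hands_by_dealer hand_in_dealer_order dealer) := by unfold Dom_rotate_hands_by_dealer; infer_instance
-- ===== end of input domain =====

-- B rotates the compass string to start at the dealer and zips the rotated seats with the
-- first three hands, instead of A's hardcoded per-dealer index table and insertion loop (idiomatic).

-- ===== PORT A =====
-- Literal port of A: nested dict of per-dealer index maps, then insert each (direction, hand[index]).
-- (PySem.List.pyGet? … ).getD [] : Pre_ guarantees the index is in range (none = IndexError, excluded by Pre_).
def rotate_hands_by_dealer (hand_in_dealer_order : List (List String)) (dealer : String) : List (String × List String) :=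
  let hands_from_dealer : PySem.Dict String (PySem.Dict String Int) :=
    PySem.Dict.ofList
      [("N", PySem.Dict.ofList [("N", 0), ("E", 1), ("S", 2)]),
       ("E", PySem.Dict.ofList [("E", 0), ("S", 1), ("W", 2)]),
       ("S", PySem.Dict.ofList [("S", 0), ("W", 1), ("N", 2)]),
       ("W", PySem.Dict.ofList [("W", 0), ("N", 1), ("E", 2)])]
  let mapping := (PySem.Dict.get? hands_from_dealer dealer).getD PySem.Dict.empty   -- KeyError excluded by Pre_
  (mapping.items.foldl
    (fun result p =>
      PySem.Dict.insert result p.1 ((PySem.List.pyGet? hand_in_dealer_order p.2).getD []))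
    PySem.Dict.empty).items

-- ===== PORT B =====
-- Literal port of B: d = compass.index(dealer) (ValueError, i.e. find = -1, excluded by Pre_);
-- seats = compass[d:] + compass[:d] (on code points, exact for the ASCII domain);
-- dict(zip(seats, hand[:3])).  Iterating a Python str yields 1-char strings, hence String.ofList [c].
def rotate_hands_by_dealer_alt (hand_in_dealer_order : List (List String)) (dealer : String) : List (String × List String) :=
  let compass : String := "NESW"
  let d := PySem.Str.find compass dealer
  let seats : List Char :=
    PySem.List.slice compass.toList (some d) none ++ PySem.List.slice compass.toList none (some d)
  (PySem.Dict.ofList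
    ((seats.map (fun c => String.ofList [c])).zip
      (PySem.List.slice hand_in_dealer_order none (some 3)))).items

-- ===== PRECONDITION & SPEC =====
-- Pre_ excludes exactly the inputs where A raises: unknown dealer (KeyError) and fewer than
-- three hands (IndexError on hand_in_dealer_order[index]).
def Pre_rotate_hands_by_dealer (hand_in_dealer_order : List (List String)) (dealer : String) : Prop :=
  (dealer = "N" ∨ dealer = "E" ∨ dealer = "S" ∨ dealer = "W") ∧ 3 ≤ hand_in_dealer_order.length
instance (hand_in_dealer_order : List (List String)) (dealer : String) : Decidable (Pre_rotate_hands_by_dealer hand_in_dealer_order dealer) := by unfold Pre_rotate_hands_by_dealer; infer_instance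

def pvWitness_rotate_hands_by_dealer : List (List String) × String :=
  ([["AK", "Q2"], ["J9"], ["T3", "54"]], "E")

def Spec_rotate_hands_by_dealer (hand_in_dealer_order : List (List String)) (dealer : String) (out : List (String × List String)) : Prop := out = rotate_hands_by_dealer_alt hand_in_dealer_order dealer
instance (hand_in_dealer_order : List (List String)) (dealer : String) (out : List (String × List String)) : Decidable (Spec_rotate_hands_by_dealer hand_in_dealer_order dealer out) := by unfold Spec_rotate_hands_by_dealer; infer_instance

-- ===== CLAIM =====
def Claim_equal_rotate_hands_by_dealer : Prop := ∀ (hand_in_dealer_order : List (List String)) (dealer : String), Dom_rotate_hands_by_dealer hand_in_dealer_order dealer → Pre_rotate_hands_by_dealer hand_in_dealer_order dealer → Spec_rotate_hands_by_dealer hand_in_dealer_order dealer (rotate_hands_by_dealer hand_in_dealer_order dealer)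

-- ===== LEMMAS AND PROOFS =====

-- ===== VERDICT =====
theorem rotate_hands_by_dealer_spec : Claim_equal_rotate_hands_by_dealer := by
  intro h dealer _ hpre
  obtain ⟨hd, hlen⟩ := hpre
  obtain ⟨a, b, c, t, rfl⟩ : ∃ a b c t, h = a :: b :: c :: t := by
    match h, hlen with
    | a :: b :: c :: t, _ => exact ⟨a, b, c, t, rfl⟩
  have h0 : (0:Int) ≤ (t.length:Int) + 1 + 1 := by omega
  have h1 : (0:Int) ≤ (t.length:Int) + 1 := by omega
  have h2 : (2:Int) ≤ (t.length:Int) + 1 + 1 := by omega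
  rcases hd with rfl | rfl | rfl | rfl <;>
    simp [Spec_rotate_hands_by_dealer, rotate_hands_by_dealer, rotate_hands_by_dealer_alt,
      PySem.Dict.get?, PySem.Dict.insert, PySem.Dict.ofList, PySem.Dict.empty,
      PySem.Dict.update, PySem.Dict.contains, PySem.Str.find,
      PySem.List.slice, PySem.List.clampIdx,
      PySem.List.pyGet?, PySem.List.pyIdx?, h0, h1, h2,
      (by decide : PySem.Chars.find ['N','E','S','W'] ['N'] = 0),
      (by decide : PySem.Chars.find ['N','E','S','W'] ['E'] = 1),
      (by decide : PySem.Chars.find ['N','E','S','W'] ['S'] = 2),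
      (by decide : PySem.Chars.find ['N','E','S','W'] ['W'] = 3)]
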